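-- pv_equiv track=rewrite | github.com/pkpal-uhobp/BD_1 | tabs/modules/search_operations/advanced_select_dialog.py | _check_quantifiers
-- ===== SOURCE A (Python) =====
-- def _check_quantifiers(pattern):
--     """Проверяет правильность квантификаторов"""
--     i = 0
--     while i < len(pattern):
--         # Пропускаем экранированные символы
--         if pattern[i] == '\\' and i + 1 < len(pattern):
--             i += 2
--             continue
--         # Квантификаторы должны следовать за символом, группой или классом символов
--         if pattern[i] in '*+?' and i == 0:
--             return False
--         if pattern[i] in '*+?':
--             prev_char = pattern[i - 1]
--             # Проверяем, что перед квантификатором есть что-то допустимое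
--             if prev_char in '|(':
--                 return False
--         i += 1
--     return True
-- ===== SOURCE B (Python) =====
-- def _check_quantifiers(pattern):
--     # Pass 1: tokenize, pairing each backslash with its following char (a lone
--     # trailing backslash stays a single token); record each token's start index.
--     tokens = []
--     i = 0
--     n = len(pattern)
--     while i < n:
--         if pattern[i] == '\\' and i + 1 < n:
--             tokens.append((i, pattern[i:i + 2]))
--             i += 2
--         else:
--             tokens.append((i, pattern[i]))
--             i += 1
--     # Pass 2: every single-char quantifier token must not sit at index 0 and
--     # the raw previous character must not be '|' or '('.
--     return all(not (len(tok) == 1 and tok in '*+?'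
--                     and (idx == 0 or pattern[idx - 1] in '|('))
--                for idx, tok in tokens)
-- ===== Notes on version B (the rewrite author's own statement) =====
-- stated objective: alternative
-- what changed: Replaces A's single while-loop with early returns by a two-pass design: first tokenize the pattern (a backslash escape pair becomes one two-char token), then an all() over the tokens rejecting any single-char quantifier token that sits at index 0 or whose raw preceding character is an alternation bar or opening parenthesis.
import Mathlib
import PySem

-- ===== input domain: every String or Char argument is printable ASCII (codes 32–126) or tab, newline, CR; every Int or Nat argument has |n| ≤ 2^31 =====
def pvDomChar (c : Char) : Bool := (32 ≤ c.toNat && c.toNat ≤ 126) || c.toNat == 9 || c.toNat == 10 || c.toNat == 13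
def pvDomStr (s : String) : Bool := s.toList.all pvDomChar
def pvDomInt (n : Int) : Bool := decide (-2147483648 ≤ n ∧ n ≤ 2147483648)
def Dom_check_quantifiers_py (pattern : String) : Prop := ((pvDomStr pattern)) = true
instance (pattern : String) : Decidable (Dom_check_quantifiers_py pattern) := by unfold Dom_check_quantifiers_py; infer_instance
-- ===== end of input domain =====

-- B replaces A's single index loop (early returns) by a two-pass design: tokenize escape
-- pairs first, then check every quantifier token; same O(n) cost, a different decomposition.


-- ===== PORT A =====
-- literal transliteration of A's while loop over the index i
def checkQuantAuxA (cs : List Char) (i : Nat) : Bool :=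
  if _h : i < cs.length then
    let c := cs.getD i ' '
    if c = '\\' ∧ i + 1 < cs.length then
      checkQuantAuxA cs (i + 2)
    else if (c = '*' ∨ c = '+' ∨ c = '?') ∧ i = 0 then
      false
    else if c = '*' ∨ c = '+' ∨ c = '?' then
      -- this branch has i ≠ 0, so pattern[i-1] is cs.getD (i-1)
      let prev := cs.getD (i - 1) ' '
      if prev = '|' ∨ prev = '(' then false
      else checkQuantAuxA cs (i + 1)
    else checkQuantAuxA cs (i + 1)
  else true
termination_by cs.length - i

def check_quantifiers_py (pattern : String) : Bool :=
  checkQuantAuxA pattern.toList 0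

-- ===== PORT B =====
-- pass 1: tokens with their start index; a backslash pairs with its following char
-- into one two-char token (a lone trailing backslash stays a single token)
def checkQuantTokens : List Char → Nat → List (Nat × List Char)
  | '\\' :: c :: rest, i => (i, ['\\', c]) :: checkQuantTokens rest (i + 2)
  | c :: rest, i => (i, [c]) :: checkQuantTokens rest (i + 1)
  | [], _ => []

-- pass 2: a single-char quantifier token must not sit at index 0 nor follow a raw '|' or '('
def checkQuantTokOk (cs : List Char) (t : Nat × List Char) : Bool :=
  match t with
  | (idx, [c]) =>
    !((c = '*' ∨ c = '+' ∨ c = '?') ∧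
      (idx = 0 ∨ cs.getD (idx - 1) ' ' = '|' ∨ cs.getD (idx - 1) ' ' = '('))
  | _ => true

def check_quantifiers_py_alt (pattern : String) : Bool :=
  (checkQuantTokens pattern.toList 0).all (checkQuantTokOk pattern.toList)

-- ===== PRECONDITION & SPEC =====
def Spec_check_quantifiers_py (pattern : String) (out : Bool) : Prop := out = check_quantifiers_py_alt pattern
instance (pattern : String) (out : Bool) : Decidable (Spec_check_quantifiers_py pattern out) := by unfold Spec_check_quantifiers_py; infer_instance

-- ===== CLAIM (what is proved, stated in full; the proofs are below) =====
def Claim_equal_check_quantifiers_py : Prop := ∀ (pattern : String), Dom_check_quantifiers_py pattern → Spec_check_quantifiers_py pattern (check_quantifiers_py pattern)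

-- ===== LEMMAS AND PROOFS =====

lemma tokens_single (c : Char) (i : Nat) :
    checkQuantTokens [c] i = [(i, [c])] := by
  rw [checkQuantTokens.eq_def]
  split
  · rename_i heq; simp at heq
  · rename_i heq; injection heq with h1 h2; subst h1; rw [← h2]; rfl
  · rename_i heq; simp at heq

lemma tokens_cons_ne (c d : Char) (rest : List Char) (i : Nat) (hc : c ≠ '\\') :
    checkQuantTokens (c :: d :: rest) i = (i, [c]) :: checkQuantTokens (d :: rest) (i + 1) := by
  rw [checkQuantTokens.eq_def]
  split
  · rename_i heq; injection heq with h1 _; exact absurd h1 hc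
  · rename_i heq; injection heq with h1 h2; subst h1; rw [← h2]
  · rename_i heq; simp at heq

lemma drop_cons_facts (cs : List Char) (i : Nat) (c : Char) (rest : List Char)
    (h : c :: rest = cs.drop i) :
    i < cs.length ∧ cs.getD i ' ' = c ∧ rest = cs.drop (i + 1) := by
  have hlt : i < cs.length := by
    by_contra hge
    rw [List.drop_eq_nil_of_le (by omega)] at h; simp at h
  have h2 := List.drop_eq_getElem_cons hlt
  rw [← h] at h2
  injection h2 with h3 h4
  exact ⟨hlt, by simp [List.getD, List.getElem?_eq_getElem hlt, h3.symm], h4⟩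

lemma checkQuantAuxA_eq_all (cs : List Char) :
    ∀ (suf : List Char) (i : Nat), suf = cs.drop i →
      checkQuantAuxA cs i = (checkQuantTokens suf i).all (checkQuantTokOk cs) := by
  intro suf i
  induction suf, i using checkQuantTokens.induct with
  | case3 i =>
    intro hsuf
    have hlen : ¬ i < cs.length := by
      by_contra h
      rw [List.drop_eq_getElem_cons h] at hsuf; simp at hsuf; omega
    unfold checkQuantAuxA
    simp [hlen, checkQuantTokens]
  | case1 c rest i ih =>
    intro hsuf
    obtain ⟨hlt, hget, hdrop1⟩ := drop_cons_facts cs i '\\' (c :: rest) hsuf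
    obtain ⟨hlt1, _, hdrop2⟩ := drop_cons_facts cs (i + 1) c rest hdrop1
    unfold checkQuantAuxA
    rw [dif_pos hlt]
    simp only [hget, true_and]
    rw [if_pos hlt1, ih hdrop2]
    simp [checkQuantTokens, checkQuantTokOk]
  | case2 c rest i hne ih =>
    intro hsuf
    obtain ⟨hlt, hget, hdrop1⟩ := drop_cons_facts cs i c rest hsuf
    have hcond : ¬ (c = '\\' ∧ i + 1 < cs.length) := by
      rintro ⟨hbs, hl1⟩
      rcases rest with _ | ⟨d, r⟩
      · rw [List.drop_eq_getElem_cons hl1] at hdrop1; simp at hdrop1; omega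
      · exact hne d r hbs rfl
    have htok : checkQuantTokens (c :: rest) i = (i, [c]) :: checkQuantTokens rest (i + 1) := by
      rcases rest with _ | ⟨d, r⟩
      · exact tokens_single c i
      · exact tokens_cons_ne c d r i (fun hc => hne d r hc rfl)
    unfold checkQuantAuxA
    rw [dif_pos hlt]
    simp only [hget]
    rw [if_neg hcond, htok, List.all_cons]
    by_cases hq : c = '*' ∨ c = '+' ∨ c = '?'
    · by_cases hi0 : i = 0
      · rw [if_pos ⟨hq, hi0⟩]
        have hok : checkQuantTokOk cs (i, [c]) = false := by
          simp [checkQuantTokOk]; tauto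
        rw [hok]; simp
      · rw [if_neg (fun h => hi0 h.2), if_pos hq]
        by_cases hprev : cs.getD (i - 1) ' ' = '|' ∨ cs.getD (i - 1) ' ' = '('
        · rw [if_pos hprev]
          have hok : checkQuantTokOk cs (i, [c]) = false := by
            simp [checkQuantTokOk]; tauto
          rw [hok]; simp
        · rw [if_neg hprev, ih hdrop1]
          have hok : checkQuantTokOk cs (i, [c]) = true := by
            push Not at hprev
            simp [checkQuantTokOk]; tauto
          rw [hok]; simp
    · rw [if_neg (fun h => hq h.1), if_neg hq, ih hdrop1]
      have hok : checkQuantTokOk cs (i, [c]) = true := by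
        simp [checkQuantTokOk]; tauto
      rw [hok]; simp

-- ===== VERDICT (by name: the statement is the Claim_ definition above) =====
theorem check_quantifiers_py_spec : Claim_equal_check_quantifiers_py := by
  intro pattern _
  unfold Spec_check_quantifiers_py check_quantifiers_py check_quantifiers_py_alt
  exact checkQuantAuxA_eq_all _ _ 0 rfl
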